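-- pv_equiv track=rewrite | github.com/zhouzonglong/ldanew | python面试宝典/6基本数字运算/6.8求数列第1500个数.py | get1500
-- ===== SOURCE A (Python) =====
-- def get1500(n):
--     i=1
--     list=[]
--     count=0
--     while True:
--         if i%2==0 or i%3==0 or i%5==0:
--             count+=1
--             list.append(i)
--         if count==n:
--             break
--         i+=1
--     return list
-- ===== SOURCE B (Python) =====
-- # Closed form: multiples of 2,3,5 repeat with period 30 (22 hits per block),
-- # so the k-th value (0-based) is 30*(k//22) + _BLOCK[k%22].
-- _BLOCK = [2, 3, 4, 5, 6, 8, 9, 10, 12, 14, 15, 16, 18, 20, 21, 22, 24, 25, 26, 27, 28, 30]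
--
-- def get1500(n):
--     return [30 * (k // 22) + _BLOCK[k % 22] for k in range(n)]
-- ===== Notes on version B (the rewrite author's own statement) =====
-- stated objective: alternative
-- what changed: Replaced the scan of every integer (testing each for divisibility by 2, 3, 5) with a closed form: the hits repeat with period 30 (22 per block), so the k-th value is 30*(k//22) + table[k%22], computed directly for each k in range(n).
import Mathlib
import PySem

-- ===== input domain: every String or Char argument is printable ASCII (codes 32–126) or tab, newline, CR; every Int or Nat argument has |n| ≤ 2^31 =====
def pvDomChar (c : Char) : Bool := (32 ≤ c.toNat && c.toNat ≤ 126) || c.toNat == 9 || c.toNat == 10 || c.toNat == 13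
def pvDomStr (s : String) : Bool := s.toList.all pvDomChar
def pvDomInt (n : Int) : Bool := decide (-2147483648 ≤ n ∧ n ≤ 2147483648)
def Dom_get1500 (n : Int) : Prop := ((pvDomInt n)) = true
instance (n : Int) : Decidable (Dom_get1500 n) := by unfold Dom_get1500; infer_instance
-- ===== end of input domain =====

-- B replaces A's integer-by-integer scan with a period-30 closed form (22 hits per block of 30).

-- ===== PORT A =====
-- Python's % with a positive literal divisor equals Lean's emod (used for termination)
lemma pvmod2 (a : Int) : PySem.Int.mod a 2 = a % 2 := PySem.Int.mod_eq_emod_of_pos (by norm_num)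
lemma pvmod3 (a : Int) : PySem.Int.mod a 3 = a % 3 := PySem.Int.mod_eq_emod_of_pos (by norm_num)
lemma pvmod5 (a : Int) : PySem.Int.mod a 5 = a % 5 := PySem.Int.mod_eq_emod_of_pos (by norm_num)

-- while True: loop as recursion; the `count < n` guard is the totality guard (Python
-- breaks exactly at count == n, and count only ever reaches n from below when 0 ≤ n).
def get1500loop (n i count : Int) (acc : List Int) : List Int :=
  if _h : count < n then
    if PySem.Int.mod i 2 == 0 || PySem.Int.mod i 3 == 0 || PySem.Int.mod i 5 == 0 then
      if count + 1 == n then acc ++ [i]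
      else get1500loop n (i+1) (count+1) (acc ++ [i])
    else get1500loop n (i+1) count acc
  else acc
termination_by (2 * (n - count).toNat + (if i % 2 = 0 then 0 else 1))
decreasing_by
  · simp only [pvmod2, pvmod3, pvmod5, beq_iff_eq] at *
    split_ifs <;> omega
  · simp only [pvmod2, pvmod3, pvmod5, Bool.or_eq_true, beq_iff_eq, not_or] at *
    split_ifs <;> omega

def get1500 (n : Int) : List Int := get1500loop n 1 0 []

-- ===== PORT B =====
def TBL : List Int := [2, 3, 4, 5, 6, 8, 9, 10, 12, 14, 15, 16, 18, 20, 21, 22, 24, 25, 26, 27, 28, 30]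

def get1500_alt (n : Int) : List Int :=
  (PySem.List.pyRange 0 n 1).map
    (fun k => 30 * PySem.Int.floordiv k 22 + PySem.List.pyGetD TBL (PySem.Int.mod k 22) 0)

-- ===== PRECONDITION & SPEC =====
-- Pre_ excludes n < 0, on which Python A loops forever (count starts at 0 and only grows).
def Pre_get1500 (n : Int) : Prop := 0 ≤ n
instance (n : Int) : Decidable (Pre_get1500 n) := by unfold Pre_get1500; infer_instance
def pvWitness_get1500 : Int := (5)

def Spec_get1500 (n : Int) (out : List Int) : Prop := out = get1500_alt n
instance (n : Int) (out : List Int) : Decidable (Spec_get1500 n out) := by unfold Spec_get1500; infer_instance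

-- ===== CLAIM (what is proved, stated in full; the proofs are below) =====
def Claim_equal_get1500 : Prop := ∀ (n : Int), Dom_get1500 n → Pre_get1500 n → Spec_get1500 n (get1500 n)

-- ===== LEMMAS AND PROOFS =====

-- the divisibility test of A, as a predicate
def dS (i : Int) : Bool :=
  PySem.Int.mod i 2 == 0 || PySem.Int.mod i 3 == 0 || PySem.Int.mod i 5 == 0

-- "next m hits from position i", in a structurally recursive form: when i itself is not
-- a hit, i is odd, so i+1 is even and is the next hit.
def fS (i : Int) : Nat → List Int
  | 0 => []
  | m+1 => if dS i then i :: fS (i+1) m else (i+1) :: fS (i+2) m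

lemma dS_succ_of_neg {i : Int} (h : dS i = false) : dS (i+1) = true := by
  simp only [dS, pvmod2, pvmod3, pvmod5, Bool.or_eq_true, beq_iff_eq, Bool.or_eq_false_iff,
    beq_eq_false_iff_ne] at h ⊢
  omega

lemma fS_pos {i : Int} (h : dS i = true) (m : Nat) : fS i (m+1) = i :: fS (i+1) m := by
  simp [fS, h]

lemma fS_neg {i : Int} (h : dS i = false) (m : Nat) : fS i (m+1) = (i+1) :: fS (i+2) m := by
  simp [fS, h]

-- skipping a non-hit does not change the stream
lemma fS_skip {i : Int} (h : dS i = false) (m : Nat) : fS (i+1) m = fS i m := by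
  cases m with
  | zero => simp [fS]
  | succ m =>
    rw [fS_neg h, fS_pos (dS_succ_of_neg h)]
    ring_nf

-- the loop of A produces acc ++ the next (n-count) hits from i
lemma loop_eq_fS (n i count : Int) (acc : List Int) :
    get1500loop n i count acc = acc ++ fS i (n - count).toNat := by
  fun_induction get1500loop n i count acc with
  | case1 i count acc h hd heq =>
    have h1 : (n - count).toNat = 1 := by simp only [beq_iff_eq] at heq; omega
    rw [h1, fS_pos (by simpa [dS] using hd)]
    simp [fS]
  | case2 i count acc h hd heq ih =>
    have h1 : (n - count).toNat = (n - (count+1)).toNat + 1 := by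
      simp only [beq_iff_eq] at heq; omega
    rw [h1, fS_pos (by simpa [dS] using hd), ih]
    simp
  | case3 i count acc h hd ih =>
    have h1 : (n - count).toNat ≠ 0 := by omega
    obtain ⟨m, hm⟩ : ∃ m, (n - count).toNat = m + 1 := ⟨(n - count).toNat - 1, by omega⟩
    rw [ih, hm, fS_skip (by simpa [dS] using hd)]
  | case4 i count acc h =>
    have h0 : (n - count).toNat = 0 := by omega
    rw [h0]; simp [fS]

-- closed form: the k-th hit (0-based)
def g (k : Nat) : Int := 30 * ((k / 22 : Nat) : Int) + TBL.getD (k % 22) 0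

lemma g_add22 (k : Nat) : g (22 + k) = g k + 30 := by
  unfold g
  rw [show 22 + k = k + 22 by omega, Nat.add_div_right _ (by norm_num),
    Nat.add_mod_right]
  push_cast; ring

-- shifting the start position by one period shifts every hit by 30
lemma fS_shift (m : Nat) : ∀ i : Int, fS (i + 30) m = (fS i m).map (· + 30) := by
  induction m with
  | zero => intro i; simp [fS]
  | succ m ih =>
    intro i
    have hd : dS (i + 30) = dS i := by
      simp only [dS, pvmod2, pvmod3, pvmod5]
      rw [show (i+30) % 2 = i % 2 by omega, show (i+30) % 3 = i % 3 by omega,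
        show (i+30) % 5 = i % 5 by omega]
    cases hdi : dS i with
    | true =>
      rw [fS_pos (by rw [hd, hdi]), fS_pos hdi, List.map_cons,
        show i + 30 + 1 = i + 1 + 30 by ring, ih (i + 1)]
    | false =>
      rw [fS_neg (by rw [hd, hdi]), fS_neg hdi, List.map_cons,
        show i + 30 + 1 = i + 1 + 30 by ring, show i + 30 + 2 = i + 2 + 30 by ring, ih (i + 2)]

-- one full block from position 1: the 22 table values, then continue at 31
lemma base_block (m : Nat) : fS 1 (22 + m) = TBL ++ fS 31 m := by
  rw [show 22+m = (21+m)+1 by omega]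
  rw [show fS 1 ((21+m)+1) = 2 :: fS 3 (21+m) from fS_neg (by decide) _]
  rw [show 21+m = (20+m)+1 by omega]
  rw [show fS 3 ((20+m)+1) = 3 :: fS 4 (20+m) from fS_pos (by decide) _]
  rw [show 20+m = (19+m)+1 by omega]
  rw [show fS 4 ((19+m)+1) = 4 :: fS 5 (19+m) from fS_pos (by decide) _]
  rw [show 19+m = (18+m)+1 by omega]
  rw [show fS 5 ((18+m)+1) = 5 :: fS 6 (18+m) from fS_pos (by decide) _]
  rw [show 18+m = (17+m)+1 by omega]
  rw [show fS 6 ((17+m)+1) = 6 :: fS 7 (17+m) from fS_pos (by decide) _]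
  rw [show 17+m = (16+m)+1 by omega]
  rw [show fS 7 ((16+m)+1) = 8 :: fS 9 (16+m) from fS_neg (by decide) _]
  rw [show 16+m = (15+m)+1 by omega]
  rw [show fS 9 ((15+m)+1) = 9 :: fS 10 (15+m) from fS_pos (by decide) _]
  rw [show 15+m = (14+m)+1 by omega]
  rw [show fS 10 ((14+m)+1) = 10 :: fS 11 (14+m) from fS_pos (by decide) _]
  rw [show 14+m = (13+m)+1 by omega]
  rw [show fS 11 ((13+m)+1) = 12 :: fS 13 (13+m) from fS_neg (by decide) _]
  rw [show 13+m = (12+m)+1 by omega]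
  rw [show fS 13 ((12+m)+1) = 14 :: fS 15 (12+m) from fS_neg (by decide) _]
  rw [show 12+m = (11+m)+1 by omega]
  rw [show fS 15 ((11+m)+1) = 15 :: fS 16 (11+m) from fS_pos (by decide) _]
  rw [show 11+m = (10+m)+1 by omega]
  rw [show fS 16 ((10+m)+1) = 16 :: fS 17 (10+m) from fS_pos (by decide) _]
  rw [show 10+m = (9+m)+1 by omega]
  rw [show fS 17 ((9+m)+1) = 18 :: fS 19 (9+m) from fS_neg (by decide) _]
  rw [show 9+m = (8+m)+1 by omega]
  rw [show fS 19 ((8+m)+1) = 20 :: fS 21 (8+m) from fS_neg (by decide) _]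
  rw [show 8+m = (7+m)+1 by omega]
  rw [show fS 21 ((7+m)+1) = 21 :: fS 22 (7+m) from fS_pos (by decide) _]
  rw [show 7+m = (6+m)+1 by omega]
  rw [show fS 22 ((6+m)+1) = 22 :: fS 23 (6+m) from fS_pos (by decide) _]
  rw [show 6+m = (5+m)+1 by omega]
  rw [show fS 23 ((5+m)+1) = 24 :: fS 25 (5+m) from fS_neg (by decide) _]
  rw [show 5+m = (4+m)+1 by omega]
  rw [show fS 25 ((4+m)+1) = 25 :: fS 26 (4+m) from fS_pos (by decide) _]
  rw [show 4+m = (3+m)+1 by omega]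
  rw [show fS 26 ((3+m)+1) = 26 :: fS 27 (3+m) from fS_pos (by decide) _]
  rw [show 3+m = (2+m)+1 by omega]
  rw [show fS 27 ((2+m)+1) = 27 :: fS 28 (2+m) from fS_pos (by decide) _]
  rw [show 2+m = (1+m)+1 by omega]
  rw [show fS 28 ((1+m)+1) = 28 :: fS 29 (1+m) from fS_pos (by decide) _]
  rw [show 1+m = (0+m)+1 by omega]
  rw [show fS 29 ((0+m)+1) = 30 :: fS 31 (0+m) from fS_neg (by decide) _]
  simp [TBL]

-- the stream from 1 is the closed form
lemma fS_one (m : Nat) : fS 1 m = (List.range m).map g := by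
  induction m using Nat.strong_induction_on with
  | _ m ih =>
    by_cases hm : m < 22
    · interval_cases m <;> decide
    · obtain ⟨m', rfl⟩ : ∃ m', m = 22 + m' := ⟨m - 22, by omega⟩
      rw [base_block, show (31 : Int) = 1 + 30 by norm_num, fS_shift,
        ih m' (by omega), List.range_add]
      simp only [List.map_append, List.map_map]
      rw [show List.map g (List.range 22) = TBL from by decide]
      exact congrArg (TBL ++ ·) (List.map_congr_left fun k _ => by
        simp only [Function.comp_apply]; exact (g_add22 k).symm)

-- B's closed form agrees with g pointwise on naturals
lemma alt_eq_map_g (n : Int) :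
    get1500_alt n = (List.range n.toNat).map g := by
  unfold get1500_alt
  rw [PySem.List.pyRange_one]
  simp only [List.map_map, Int.sub_zero]
  apply List.map_congr_left
  intro k _
  simp only [Function.comp_apply, zero_add]
  rw [show (22 : Int) = ((22 : Nat) : Int) by norm_num, PySem.Int.floordiv_natCast,
    PySem.Int.mod_natCast, PySem.List.pyGetD_natCast]
  rfl

-- ===== VERDICT (by name: the statement is the Claim_ definition above) =====
theorem get1500_spec : Claim_equal_get1500 := by
  intro n _ hpre
  unfold Spec_get1500 get1500
  rw [loop_eq_fS, alt_eq_map_g n]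
  simpa using fS_one n.toNat
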